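-- pv_equiv track=rewrite | github.com/rmpurp/Tones | tones.py | get_vowels
-- ===== SOURCE A (Python) =====
-- vowels = ['a', 'e', 'i', 'o', 'u', 'v']
--
-- def get_vowels(reversed):
--     found_vowel = False
--     v = ''
--     for letter in reversed:
--         if letter in vowels:
--             v += letter
--             found_vowel = True
--         elif found_vowel:
--             break
--     return v
-- ===== SOURCE B (Python) =====
-- def get_vowels(reversed):
--     vowels = 'aeiouv'
--     s = ''.join(reversed)
--     n = len(s)
--     i = 0
--     while i < n and s[i] not in vowels:
--         i += 1
--     j = i
--     while j < n and s[j] in vowels: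
--         j += 1
--     return s[i:j]
-- ===== Notes on version B (the rewrite author's own statement) =====
-- stated objective: alternative
-- what changed: Replaces A's single flag-controlled loop that accumulates characters by += into a two-phase index scan: first advance an index past the leading non-vowels, then advance a second index to the end of the vowel run, and return the slice s[i:j].
import Mathlib
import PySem

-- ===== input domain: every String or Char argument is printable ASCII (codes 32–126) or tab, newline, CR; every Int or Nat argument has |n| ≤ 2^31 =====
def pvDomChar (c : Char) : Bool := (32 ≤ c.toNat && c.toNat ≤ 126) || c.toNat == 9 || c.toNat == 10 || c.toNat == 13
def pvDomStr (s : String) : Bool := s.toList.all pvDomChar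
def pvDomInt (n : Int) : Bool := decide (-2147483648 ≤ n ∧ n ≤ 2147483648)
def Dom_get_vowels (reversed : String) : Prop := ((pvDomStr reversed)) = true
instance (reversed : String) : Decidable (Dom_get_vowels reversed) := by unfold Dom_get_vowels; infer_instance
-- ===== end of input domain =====

-- B replaces A's flag-controlled single scan by a two-phase index scan (skip the
-- non-vowel prefix, then find the end of the vowel run, then slice); objective:
-- simpler/alternative decomposition, same O(n) cost.

-- ===== PORT A =====
-- vowels = ['a', 'e', 'i', 'o', 'u', 'v']
def pvAVowels : List Char := ['a', 'e', 'i', 'o', 'u', 'v']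

-- the for-loop with its break, state (found_vowel, v); v built by += as in A
def pvALoop : List Char → Bool → List Char → List Char
  | [], _, v => v
  | c :: rest, found, v =>
    if pvAVowels.contains c then pvALoop rest true (v ++ [c])
    else if found then v
    else pvALoop rest found v

def get_vowels (reversed : String) : String :=
  String.ofList (pvALoop reversed.toList false [])

-- ===== PORT B =====
-- letter in 'aeiouv'
def pvBVowel (c : Char) : Bool := "aeiouv".toList.contains c

-- first while loop: advance i past leading non-vowels
def pvBSkip (s : List Char) (i : Nat) : Nat :=
  if h : i < s.length then
    if pvBVowel s[i] then i else pvBSkip s (i + 1)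
  else i
termination_by s.length - i

-- second while loop: advance j to the end of the vowel run
def pvBTake (s : List Char) (j : Nat) : Nat :=
  if h : j < s.length then
    if pvBVowel s[j] then pvBTake s (j + 1) else j
  else j
termination_by s.length - j

def get_vowels_alt (reversed : String) : String :=
  -- s[i:j] with 0 ≤ i ≤ j ≤ len s: exactly (drop i).take (j - i)
  String.ofList ((reversed.toList.drop (pvBSkip reversed.toList 0)).take
    (pvBTake reversed.toList (pvBSkip reversed.toList 0) - pvBSkip reversed.toList 0))

-- ===== PRECONDITION & SPEC =====
def Spec_get_vowels (reversed : String) (out : String) : Prop := out = get_vowels_alt reversed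
instance (reversed : String) (out : String) : Decidable (Spec_get_vowels reversed out) := by unfold Spec_get_vowels; infer_instance

-- ===== CLAIM (what is proved, stated in full; the proofs are below) =====
def Claim_equal_get_vowels : Prop := ∀ (reversed : String), Dom_get_vowels reversed → Spec_get_vowels reversed (get_vowels reversed)

-- ===== LEMMAS AND PROOFS =====

theorem pv_vowel_eq (c : Char) : pvAVowels.contains c = pvBVowel c := rfl

theorem pv_vowel_mem (c : Char) : (c ∈ pvAVowels) ↔ pvBVowel c = true := by
  rw [← pv_vowel_eq]; simp

-- A's loop after the first vowel: appends the remaining vowel run to the accumulator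
theorem pvALoop_found (rest : List Char) : ∀ acc,
    pvALoop rest true acc = acc ++ rest.takeWhile pvBVowel := by
  induction rest with
  | nil => intro acc; simp [pvALoop]
  | cons c r ih =>
    intro acc
    by_cases hc : pvBVowel c = true
    · simp [pvALoop, pv_vowel_mem, hc, ih]
    · simp [pvALoop, pv_vowel_mem, hc]

-- A's loop = takeWhile after dropWhile
theorem pvALoop_eq (cs : List Char) :
    pvALoop cs false [] =
      (cs.dropWhile (fun c => !pvBVowel c)).takeWhile pvBVowel := by
  induction cs with
  | nil => simp [pvALoop]
  | cons c r ih =>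
    by_cases hc : pvBVowel c = true
    · simp [pvALoop, pv_vowel_mem, hc, pvALoop_found]
    · simp [pvALoop, pv_vowel_mem, hc, ih]

theorem pvBSkip_drop (s : List Char) : ∀ n i, s.length - i ≤ n →
    s.drop (pvBSkip s i) = (s.drop i).dropWhile (fun c => !pvBVowel c) := by
  intro n
  induction n with
  | zero =>
    intro i hi
    have hlen : s.length ≤ i := by omega
    rw [pvBSkip]
    simp [List.drop_eq_nil_of_le hlen, Nat.not_lt_of_le hlen]
  | succ n ih =>
    intro i hi
    rw [pvBSkip]
    by_cases h : i < s.length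
    · have hdrop : s.drop i = s[i] :: s.drop (i + 1) := by
        rw [List.drop_eq_getElem_cons h]
      by_cases hv : pvBVowel s[i] = true
      · rw [dif_pos h, if_pos hv, hdrop, List.dropWhile_cons, if_neg (by simp [hv]), ← hdrop]
      · rw [dif_pos h, if_neg hv, ih (i + 1) (by omega), hdrop, List.dropWhile_cons,
          if_pos (by simp [hv])]
    · rw [dif_neg h]
      simp [List.drop_eq_nil_of_le (by omega : s.length ≤ i)]

theorem pvBTake_le (s : List Char) : ∀ n j, s.length - j ≤ n → j ≤ pvBTake s j := by
  intro n
  induction n with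
  | zero =>
    intro j hj
    rw [pvBTake]
    simp [Nat.not_lt_of_le (by omega : s.length ≤ j)]
  | succ n ih =>
    intro j hj
    rw [pvBTake]
    by_cases h : j < s.length
    · by_cases hv : pvBVowel s[j] = true
      · have := ih (j + 1) (by omega)
        rw [dif_pos h, if_pos hv]
        omega
      · rw [dif_pos h, if_neg hv]
    · rw [dif_neg h]

theorem pvBTake_take (s : List Char) : ∀ n j, s.length - j ≤ n →
    (s.drop j).take (pvBTake s j - j) = (s.drop j).takeWhile pvBVowel := by
  intro n
  induction n with
  | zero =>
    intro j hj
    simp [List.drop_eq_nil_of_le (by omega : s.length ≤ j)]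
  | succ n ih =>
    intro j hj
    by_cases h : j < s.length
    · have hdrop : s.drop j = s[j] :: s.drop (j + 1) := by
        rw [List.drop_eq_getElem_cons h]
      by_cases hv : pvBVowel s[j] = true
      · have hstep : pvBTake s j = pvBTake s (j + 1) := by
          rw [pvBTake, dif_pos h, if_pos hv]
        have hle : j + 1 ≤ pvBTake s (j + 1) :=
          pvBTake_le s (s.length - (j + 1)) (j + 1) le_rfl
        have hsub : pvBTake s (j + 1) - j = (pvBTake s (j + 1) - (j + 1)) + 1 := by
          omega
        rw [hstep, hdrop, hsub, List.take_succ_cons, List.takeWhile_cons, if_pos hv,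
          ih (j + 1) (by omega)]
      · have hstep : pvBTake s j = j := by
          rw [pvBTake, dif_pos h, if_neg hv]
        rw [hstep, hdrop, List.takeWhile_cons, if_neg (by simp [hv])]
        simp
    · simp [List.drop_eq_nil_of_le (by omega : s.length ≤ j)]

-- ===== VERDICT (by name: the statement is the Claim_ definition above) =====
theorem get_vowels_spec : Claim_equal_get_vowels := by
  intro r _
  unfold Spec_get_vowels get_vowels get_vowels_alt
  rw [pvALoop_eq]
  rw [pvBTake_take r.toList (r.toList.length - pvBSkip r.toList 0) _ le_rfl]
  rw [pvBSkip_drop r.toList (r.toList.length - 0) 0 le_rfl]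
  simp
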